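-- pv_equiv track=rewrite | github.com/specuser87/log-parser | CODE/Activity3_logcount.py | count_log_levels
-- ===== SOURCE A (Python) =====
-- def count_log_levels(logs):
--     """
--     Count the number of INFO, WARNING, and ERROR entries in the logs.
--
--     Returns:
--         info_count (int), warning_count (int), error_count (int)
--     """
--     info_count = 0
--     warning_count = 0
--     error_count = 0
--
--     for log in logs:
--         if "INFO" in log:
--             info_count += 1
--         elif "WARNING" in log:
--             warning_count += 1
--         elif "ERROR" in log:
--             error_count += 1
--
--     return info_count, warning_count, error_count
-- ===== SOURCE B (Python) =====
-- def count_log_levels(logs):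
--     """
--     Count the number of INFO, WARNING, and ERROR entries in the logs.
--
--     Returns:
--         info_count (int), warning_count (int), error_count (int)
--     """
--     levels = ("INFO", "WARNING", "ERROR")
--     tags = [next((lvl for lvl in levels if lvl in log), None) for log in logs]
--     return tags.count("INFO"), tags.count("WARNING"), tags.count("ERROR")
-- ===== Notes on version B (the rewrite author's own statement) =====
-- stated objective: idiomatic
-- what changed: Replaces the three-accumulator elif loop with a map-then-aggregate: each log is classified once by its first matching level (preserving INFO>WARNING>ERROR priority), and the result counts are read off the classified list.
import Mathlib
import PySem

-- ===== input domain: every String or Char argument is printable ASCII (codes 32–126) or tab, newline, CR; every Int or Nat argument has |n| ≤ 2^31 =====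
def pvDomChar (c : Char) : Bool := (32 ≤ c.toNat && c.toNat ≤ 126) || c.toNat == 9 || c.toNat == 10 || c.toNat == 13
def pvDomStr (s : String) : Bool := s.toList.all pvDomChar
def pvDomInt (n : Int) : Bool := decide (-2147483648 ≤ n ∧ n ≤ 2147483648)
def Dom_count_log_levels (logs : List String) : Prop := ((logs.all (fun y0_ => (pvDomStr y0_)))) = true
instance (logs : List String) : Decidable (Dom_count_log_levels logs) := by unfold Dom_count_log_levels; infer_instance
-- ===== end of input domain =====

-- B classifies each log by its first matching level and counts the classified list (idiomatic map-then-aggregate); same results as A's elif-chain accumulators.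


-- ===== PORT A =====
def count_log_levels (logs : List String) : Int × Int × Int :=
  let st := logs.foldl (fun (st : Int × Int × Int) log =>
    if PySem.Str.isIn "INFO" log then (st.1 + 1, st.2.1, st.2.2)
    else if PySem.Str.isIn "WARNING" log then (st.1, st.2.1 + 1, st.2.2)
    else if PySem.Str.isIn "ERROR" log then (st.1, st.2.1, st.2.2 + 1)
    else st) (0, 0, 0)
  st

-- ===== PORT B =====
def classifyLog (log : String) : Option String :=
  ["INFO", "WARNING", "ERROR"].find? (fun lvl => PySem.Str.isIn lvl log)

def count_log_levels_alt (logs : List String) : Int × Int × Int :=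
  let tags := logs.map classifyLog
  ((PySem.List.count tags (some "INFO") : Int),
   (PySem.List.count tags (some "WARNING") : Int),
   (PySem.List.count tags (some "ERROR") : Int))

-- ===== PRECONDITION & SPEC =====
def Spec_count_log_levels (logs : List String) (out : Int × Int × Int) : Prop := out = count_log_levels_alt logs
instance (logs : List String) (out : Int × Int × Int) : Decidable (Spec_count_log_levels logs out) := by unfold Spec_count_log_levels; infer_instance

-- ===== CLAIM (what is proved, stated in full; the proofs are below) =====
def Claim_equal_count_log_levels : Prop := ∀ (logs : List String), Dom_count_log_levels logs → Spec_count_log_levels logs (count_log_levels logs)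

-- ===== LEMMAS AND PROOFS =====

theorem count_log_levels_general (logs : List String) (a b c : Int) :
    logs.foldl (fun (st : Int × Int × Int) log =>
      if PySem.Str.isIn "INFO" log then (st.1 + 1, st.2.1, st.2.2)
      else if PySem.Str.isIn "WARNING" log then (st.1, st.2.1 + 1, st.2.2)
      else if PySem.Str.isIn "ERROR" log then (st.1, st.2.1, st.2.2 + 1)
      else st) (a, b, c)
    = (a + (PySem.List.count (logs.map classifyLog) (some "INFO") : Int),
       b + (PySem.List.count (logs.map classifyLog) (some "WARNING") : Int),
       c + (PySem.List.count (logs.map classifyLog) (some "ERROR") : Int)) := by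
  induction logs generalizing a b c with
  | nil => simp [PySem.List.count]
  | cons x xs ih =>
    simp only [List.foldl_cons, List.map_cons]
    rw [ih]
    simp only [classifyLog, List.find?, PySem.List.count, List.count_cons]
    simp only [PySem.Str.isIn]
    by_cases h1 : PySem.Chars.isIn ['I','N','F','O'] x.toList
    · simp [h1]; omega
    · by_cases h2 : PySem.Chars.isIn ['W','A','R','N','I','N','G'] x.toList
      · simp [h1, h2]; omega
      · by_cases h3 : PySem.Chars.isIn ['E','R','R','O','R'] x.toList
        · simp [h1, h2, h3]; omega
        · simp [h1, h2, h3]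

-- ===== VERDICT (by name: the statement is the Claim_ definition above) =====
theorem count_log_levels_spec : Claim_equal_count_log_levels := by
  intro logs _
  unfold Spec_count_log_levels count_log_levels count_log_levels_alt
  rw [count_log_levels_general]
  simp
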